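-- pv_equiv track=rewrite | github.com/martijnbentum/heritages | utils/map_util.py | combine_popups
-- ===== SOURCE A (Python) =====
-- def combine_popups(o):
-- 	'''Combines popup content of multiple instances into one popup content.'''
-- 	no = []
-- 	dublicate_locations = {}
-- 	for line in o:
-- 		if line[1] in dublicate_locations.keys(): dublicate_locations[line[1]].append(line)
-- 		else: dublicate_locations[line[1]] = [line]
-- 	for key, value in dublicate_locations.items():
-- 		if len(value) > 1:
-- 			popups = '<hr>'.join([x[2] for x in value])
-- 			ids = ':'.join([x[3] for x in value])
-- 			new_line = [value[0][0],key,popups,ids]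
-- 			no.append(new_line)
-- 		else:
-- 			no.append(value[0])
-- 	return no
-- ===== SOURCE B (Python) =====
-- def combine_popups(o):
--     '''Single pass: keep an index map from location to its slot in the output,
--     merging popup/id strings incrementally instead of grouping first.'''
--     no = []
--     seen = {}
--     for line in o:
--         loc = line[1]
--         if loc in seen:
--             i = seen[loc]
--             cur = no[i]
--             no[i] = [cur[0], loc, cur[2] + '<hr>' + line[2], cur[3] + ':' + line[3]]
--         else:
--             seen[loc] = len(no)
--             no.append(line)
--     return no
-- ===== Notes on version B (the rewrite author's own statement) =====
-- stated objective: alternative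
-- what changed: B builds the result in a single traversal, updating output slots in place through a location-to-index map and concatenating the popup/id strings incrementally, instead of A's two passes (group all lines into a dict of lists, then join each group).
import Mathlib
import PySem

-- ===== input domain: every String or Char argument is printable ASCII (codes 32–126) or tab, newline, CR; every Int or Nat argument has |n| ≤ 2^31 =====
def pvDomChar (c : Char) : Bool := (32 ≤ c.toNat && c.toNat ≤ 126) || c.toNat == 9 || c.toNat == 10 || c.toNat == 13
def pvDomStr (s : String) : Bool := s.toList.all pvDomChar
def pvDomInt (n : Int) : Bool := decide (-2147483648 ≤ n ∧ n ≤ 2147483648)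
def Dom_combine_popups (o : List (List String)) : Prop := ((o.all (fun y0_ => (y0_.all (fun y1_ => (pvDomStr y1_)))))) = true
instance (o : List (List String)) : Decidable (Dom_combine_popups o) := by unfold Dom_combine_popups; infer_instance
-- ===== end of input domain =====

-- B merges in ONE traversal, updating output slots in place through a location→index map,
-- instead of A's two passes (group lines into a dict of lists, then join each group).

-- ===== PORT A =====
-- first loop body: 'if line[1] in dublicate_locations: …append(line) else: … = [line]'
def pvStepA (d : PySem.Dict String (List (List String))) (line : List String) :
    PySem.Dict String (List (List String)) :=
  if d.contains (PySem.List.pyGetD line 1 "") then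
    d.modify (PySem.List.pyGetD line 1 "") [] (fun v => v ++ [line])
  else
    d.insert (PySem.List.pyGetD line 1 "") [line]

-- second loop body: emit one output row per dict item
def pvEmitA (no : List (List String)) (kv : String × List (List String)) : List (List String) :=
  if 1 < kv.2.length then
    no ++ [[PySem.List.pyGetD (PySem.List.pyGetD kv.2 0 []) 0 "", kv.1,
            PySem.Str.join "<hr>" (kv.2.map (fun x => PySem.List.pyGetD x 2 "")),
            PySem.Str.join ":" (kv.2.map (fun x => PySem.List.pyGetD x 3 ""))]]
  else
    no ++ [PySem.List.pyGetD kv.2 0 []]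

def combine_popups (o : List (List String)) : List (List String) :=
  let dublicate_locations := o.foldl pvStepA PySem.Dict.empty
  dublicate_locations.items.foldl pvEmitA []

-- ===== PORT B =====
-- loop body of the single pass: state = (output list 'no', 'seen' location → index)
def pvStepB (st : List (List String) × PySem.Dict String Nat) (line : List String) :
    List (List String) × PySem.Dict String Nat :=
  let loc := PySem.List.pyGetD line 1 ""
  match st.2.get? loc with
  | some i =>
      let cur := PySem.List.pyGetD st.1 (i : Int) []
      (PySem.List.pySetD st.1 (i : Int)
         [PySem.List.pyGetD cur 0 "", loc,
          PySem.List.pyGetD cur 2 "" ++ "<hr>" ++ PySem.List.pyGetD line 2 "",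
          PySem.List.pyGetD cur 3 "" ++ ":" ++ PySem.List.pyGetD line 3 ""],
       st.2)
  | none => (st.1 ++ [line], st.2.insert loc st.1.length)

def combine_popups_alt (o : List (List String)) : List (List String) :=
  (o.foldl pvStepB (([], PySem.Dict.empty) :
      List (List String) × PySem.Dict String Nat)).1

-- ===== PRECONDITION & SPEC =====
-- Pre_ excludes exactly the inputs on which the Python A raises IndexError: a line with
-- fewer than 2 fields (line[1]), or a line in a shared-location group with fewer than 4
-- fields (x[2]/x[3] in the joins).
def Pre_combine_popups (o : List (List String)) : Prop :=
  ∀ l ∈ o, 2 ≤ l.length ∧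
    (1 < (o.filter (fun l' => l'.getD 1 "" == l.getD 1 "")).length → 4 ≤ l.length)
instance (o : List (List String)) : Decidable (Pre_combine_popups o) := by
  unfold Pre_combine_popups; infer_instance

def pvWitness_combine_popups : List (List String) :=
  [["a", "x", "p", "1"], ["b", "x", "q", "2"], ["c", "y", "r", "3"]]

def Spec_combine_popups (o : List (List String)) (out : List (List String)) : Prop :=
  out = combine_popups_alt o
instance (o : List (List String)) (out : List (List String)) :
    Decidable (Spec_combine_popups o out) := by unfold Spec_combine_popups; infer_instance

-- ===== CLAIM (what is proved, stated in full; the proofs are below) =====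
def Claim_equal_combine_popups : Prop :=
  ∀ (o : List (List String)), Dom_combine_popups o → Pre_combine_popups o →
    Spec_combine_popups o (combine_popups o)

-- ===== LEMMAS AND PROOFS =====

-- the location key of a line
def pvKey (l : List String) : String := PySem.List.pyGetD l 1 ""
-- the group of lines sharing location k, in order
def pvGrp (o : List (List String)) (k : String) : List (List String) :=
  o.filter (fun l => pvKey l == k)
-- the row emitted for group g at location k
def pvEmit (k : String) (g : List (List String)) : List String :=
  if 1 < g.length then
    [PySem.List.pyGetD (PySem.List.pyGetD g 0 []) 0 "", k,
     PySem.Str.join "<hr>" (g.map (fun x => PySem.List.pyGetD x 2 "")),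
     PySem.Str.join ":" (g.map (fun x => PySem.List.pyGetD x 3 ""))]
  else PySem.List.pyGetD g 0 []
-- the common reference result: one merged row per distinct location, first-occurrence order
def pvRes (o : List (List String)) : List (List String) :=
  (PySem.Set.ofList (o.map pvKey)).map (fun k => pvEmit k (pvGrp o k))
-- index of a key in a key list (B's 'seen' dict contents)
def pvLocIdx : List String → String → Option Nat
  | [], _ => none
  | x :: xs, k => if x = k then some 0 else (pvLocIdx xs k).map (· + 1)

theorem pv_cjoin_append (sep x : List Char) : ∀ (l : List (List Char)), l ≠ [] →
    PySem.Chars.join sep (l ++ [x]) = PySem.Chars.join sep l ++ sep ++ x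
  | [], h => absurd rfl h
  | [y], _ => by simp [PySem.Chars.join_cons_cons, PySem.Chars.join_singleton]
  | y :: z :: zs, _ => by
    have := pv_cjoin_append sep x (z :: zs) (by simp)
    simp only [List.cons_append, PySem.Chars.join_cons_cons] at this ⊢
    simp [this]

theorem pv_sjoin_append (xs : List String) (x sep : String) (h : xs ≠ []) :
    PySem.Str.join sep (xs ++ [x]) = PySem.Str.join sep xs ++ sep ++ x := by
  apply String.toList_injective
  simp [PySem.Str.join]
  rw [pv_cjoin_append]
  · simp
  · cases xs <;> simp_all

theorem pv_sjoin_pair (a b sep : String) : PySem.Str.join sep [a, b] = a ++ sep ++ b := by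
  apply String.toList_injective
  simp [PySem.Str.join, PySem.Chars.join_cons_cons, PySem.Chars.join_singleton]

-- ===== A-side characterisation =====
theorem pvStepA_eq_modify (d : PySem.Dict String (List (List String))) (line : List String) :
    pvStepA d line = d.modify (pvKey line) [] (fun v => v ++ [line]) := by
  unfold pvStepA pvKey
  split
  · rfl
  · rename_i h
    rw [PySem.Dict.modify, PySem.Dict.getD_of_not_contains]
    · rfl
    · simpa using h

theorem pv_A_eq (o : List (List String)) : combine_popups o = pvRes o := by
  unfold combine_popups
  have hstep : o.foldl pvStepA PySem.Dict.empty
      = (o.map (fun l => (pvKey l, l))).foldl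
          (fun d p => d.modify p.1 [] (fun v => v ++ [p.2])) PySem.Dict.empty := by
    rw [List.foldl_map]
    have hf : pvStepA = fun d l => PySem.Dict.modify d (pvKey l) [] (fun v => v ++ [l]) := by
      funext d l; exact pvStepA_eq_modify d l
    rw [hf]
  rw [hstep]
  set d := (o.map (fun l => (pvKey l, l))).foldl
      (fun d p => d.modify p.1 [] (fun v => v ++ [p.2])) PySem.Dict.empty with hd
  have hnd : d.keys.Nodup := by
    rw [hd]
    exact PySem.Dict.nodup_keys_foldl_modify_key _ _ _ _ _ PySem.Dict.nodup_keys_empty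
  have hkeys : d.keys = PySem.Set.ofList (o.map pvKey) := by
    rw [hd, PySem.Dict.keys_foldl_modify_key]
    simp [PySem.Set.update, PySem.Set.ofList_eq_foldl, List.map_map, Function.comp_def]
  have hget : ∀ k, d.getD k [] = pvGrp o k := by
    intro k
    rw [hd, PySem.Dict.getD_foldl_modify_append]
    simp [pvGrp, List.filter_map, Function.comp_def]
  have hitems : d.items = d.keys.map (fun k => (k, d.getD k [])) :=
    PySem.Dict.items_eq_map_keys d hnd []
  have hemit : pvEmitA = fun no kv => no ++ [pvEmit kv.1 kv.2] := by
    funext no kv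
    unfold pvEmitA pvEmit
    split <;> rfl
  rw [hemit, PySem.List.foldl_append_singleton_eq_map, hitems, hkeys]
  simp [pvRes, List.map_map, Function.comp_def]
  intro a _
  rw [hget]

-- ===== B-side characterisation =====
theorem pvLocIdx_eq_none_iff (ks : List String) (k : String) :
    pvLocIdx ks k = none ↔ k ∉ ks := by
  induction ks with
  | nil => simp [pvLocIdx]
  | cons x xs ih =>
    by_cases hx : x = k
    · simp [pvLocIdx, hx]
    · simp [pvLocIdx, hx, ih]
      exact fun _ h => hx h.symm

theorem pvLocIdx_append (ks : List String) (x k : String) :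
    pvLocIdx (ks ++ [x]) k =
      (match pvLocIdx ks k with
       | some i => some i
       | none => if x = k then some ks.length else none) := by
  induction ks with
  | nil => simp [pvLocIdx]
  | cons y ys ih =>
    by_cases hy : y = k
    · simp [pvLocIdx, hy]
    · simp only [List.cons_append, pvLocIdx, if_neg hy, ih]
      cases h : pvLocIdx ys k <;> by_cases hx : x = k <;> simp [hx]

theorem pvLocIdx_some (ks : List String) (k : String) (i : Nat)
    (h : pvLocIdx ks k = some i) : ∃ h' : i < ks.length, ks[i] = k := by
  induction ks generalizing i with
  | nil => simp [pvLocIdx] at h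
  | cons x xs ih =>
    by_cases hx : x = k
    · simp [pvLocIdx, hx] at h
      exact ⟨by simp [← h], by simp [← h, hx]⟩
    · simp [pvLocIdx, hx] at h
      obtain ⟨j, hj, rfl⟩ := h
      obtain ⟨hj', hk⟩ := ih j hj
      exact ⟨by simpa using hj', by simpa using hk⟩

theorem pvGrp_append_singleton (u : List (List String)) (l : List String) (k : String) :
    pvGrp (u ++ [l]) k = pvGrp u k ++ (if pvKey l == k then [l] else []) := by
  simp only [pvGrp, List.filter_append]
  congr 1
  by_cases h : pvKey l == k <;> simp_all

theorem pvGrp_eq_nil (u : List (List String)) (k : String) (h : k ∉ u.map pvKey) :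
    pvGrp u k = [] := by
  rw [pvGrp, List.filter_eq_nil_iff]
  intro a ha hk
  exact h (List.mem_map.mpr ⟨a, ha, by simpa using hk⟩)

theorem pvGrp_ne_nil (u : List (List String)) (k : String) (h : k ∈ u.map pvKey) :
    pvGrp u k ≠ [] := by
  obtain ⟨a, ha, rfl⟩ := List.mem_map.mp h
  intro hnil
  have := List.filter_eq_nil_iff.mp hnil a ha
  simp at this

theorem pvEmit_singleton (k : String) (x : List String) : pvEmit k [x] = x := by
  simp [pvEmit, PySem.List.pyGetD_zero_cons]

theorem pyGetD4_0 (a b c d : String) : PySem.List.pyGetD [a,b,c,d] (0:Int) "" = a := rfl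
theorem pyGetD4_2 (a b c d : String) : PySem.List.pyGetD [a,b,c,d] (2:Int) "" = c := rfl
theorem pyGetD4_3 (a b c d : String) : PySem.List.pyGetD [a,b,c,d] (3:Int) "" = d := rfl

theorem pvEmit_append (k : String) (l : List String) (g : List (List String)) (hg : g ≠ []) :
    pvEmit k (g ++ [l]) =
      [PySem.List.pyGetD (pvEmit k g) 0 "", k,
       PySem.List.pyGetD (pvEmit k g) 2 "" ++ "<hr>" ++ PySem.List.pyGetD l 2 "",
       PySem.List.pyGetD (pvEmit k g) 3 "" ++ ":" ++ PySem.List.pyGetD l 3 ""] := by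
  match g with
  | [] => exact absurd rfl hg
  | [x] =>
    rw [pvEmit_singleton]
    simp [pvEmit, PySem.List.pyGetD_zero_cons, pv_sjoin_pair]
  | x :: y :: ys =>
    have hlong : pvEmit k (x :: y :: ys)
        = [PySem.List.pyGetD x 0 "", k,
           PySem.Str.join "<hr>" ((x :: y :: ys).map (fun x => PySem.List.pyGetD x 2 "")),
           PySem.Str.join ":" ((x :: y :: ys).map (fun x => PySem.List.pyGetD x 3 ""))] := by
      rw [pvEmit, if_pos (by simp), PySem.List.pyGetD_zero_cons]
    rw [hlong, pyGetD4_0, pyGetD4_2, pyGetD4_3, pvEmit, if_pos (by simp)]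
    simp only [List.cons_append]
    rw [PySem.List.pyGetD_zero_cons]
    rw [show x :: (y :: (ys ++ [l])) = (x :: y :: ys) ++ [l] by simp,
        List.map_append, List.map_append, List.map_singleton, List.map_singleton,
        pv_sjoin_append _ _ _ (by simp), pv_sjoin_append _ _ _ (by simp)]

theorem pvRes_length (u : List (List String)) :
    (pvRes u).length = (PySem.Set.ofList (u.map pvKey)).length := by
  simp [pvRes]

theorem pvRes_append_new (u : List (List String)) (l : List String)
    (h : pvKey l ∉ u.map pvKey) : pvRes (u ++ [l]) = pvRes u ++ [l] := by
  have hfk : PySem.Set.ofList ((u ++ [l]).map pvKey)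
      = PySem.Set.ofList (u.map pvKey) ++ [pvKey l] := by
    rw [List.map_append, List.map_singleton, PySem.Set.ofList_append_singleton,
        PySem.Set.add_of_not_mem]
    simpa [PySem.Set.mem_ofList] using h
  unfold pvRes
  rw [hfk, List.map_append, List.map_singleton]
  congr 1
  · apply List.map_congr_left
    intro k hk
    have hne : ¬(pvKey l == k) := by
      simp only [beq_iff_eq]
      rintro rfl
      exact h (by simpa [PySem.Set.mem_ofList] using hk)
    rw [pvGrp_append_singleton, if_neg hne, List.append_nil]
  · rw [pvGrp_append_singleton, if_pos (by simp), pvGrp_eq_nil u _ h,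
        List.nil_append, pvEmit_singleton]

theorem pvRes_set_merge (u : List (List String)) (l : List String) (i : Nat)
    (hidx : pvLocIdx (PySem.Set.ofList (u.map pvKey)) (pvKey l) = some i) :
    pvRes (u ++ [l]) = (pvRes u).set i
      [PySem.List.pyGetD (pvEmit (pvKey l) (pvGrp u (pvKey l))) 0 "", pvKey l,
       PySem.List.pyGetD (pvEmit (pvKey l) (pvGrp u (pvKey l))) 2 "" ++ "<hr>"
         ++ PySem.List.pyGetD l 2 "",
       PySem.List.pyGetD (pvEmit (pvKey l) (pvGrp u (pvKey l))) 3 "" ++ ":"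
         ++ PySem.List.pyGetD l 3 ""] := by
  obtain ⟨hi, hki⟩ := pvLocIdx_some _ _ _ hidx
  have hmem : pvKey l ∈ PySem.Set.ofList (u.map pvKey) := hki ▸ List.getElem_mem hi
  have hmemm : pvKey l ∈ u.map pvKey := by simpa [PySem.Set.mem_ofList] using hmem
  have hnd : (PySem.Set.ofList (u.map pvKey)).Nodup := PySem.Set.nodup_ofList _
  have hfk : PySem.Set.ofList ((u ++ [l]).map pvKey) = PySem.Set.ofList (u.map pvKey) := by
    rw [List.map_append, List.map_singleton, PySem.Set.ofList_append_singleton,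
        PySem.Set.add_of_mem hmem]
  unfold pvRes
  rw [hfk]
  apply List.ext_getElem
  · simp
  intro j hj hj'
  have hjlen : j < (PySem.Set.ofList (u.map pvKey)).length := by simpa using hj
  rw [List.getElem_set, List.getElem_map, List.getElem_map]
  by_cases hij : i = j
  · subst hij
    rw [if_pos rfl, hki, pvGrp_append_singleton, if_pos (by simp), pvEmit_append]
    exact pvGrp_ne_nil u _ hmemm
  · rw [if_neg hij]
    have hne : (PySem.Set.ofList (u.map pvKey))[j] ≠ pvKey l := by
      rw [← hki]
      intro hc
      exact hij ((List.Nodup.getElem_inj_iff hnd).mp hc.symm)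
    rw [pvGrp_append_singleton, if_neg (by simpa using fun h => hne h.symm),
        List.append_nil]

theorem pv_B_inv (rest : List (List String)) : ∀ (u : List (List String))
    (m : PySem.Dict String Nat),
    (∀ k, m.get? k = pvLocIdx (PySem.Set.ofList (u.map pvKey)) k) →
    (rest.foldl pvStepB (pvRes u, m)).1 = pvRes (u ++ rest) := by
  induction rest with
  | nil => intro u m _; simp
  | cons line rest ih =>
    intro u m hm
    rw [List.foldl_cons]
    have hloc : PySem.List.pyGetD line 1 "" = pvKey line := rfl
    cases hg : m.get? (pvKey line) with
    | none =>
      have hnotin : pvKey line ∉ u.map pvKey := by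
        have := (hm (pvKey line)).symm.trans hg
        simpa [PySem.Set.mem_ofList] using (pvLocIdx_eq_none_iff _ _).mp this
      have hstep : pvStepB (pvRes u, m) line
          = (pvRes u ++ [line], m.insert (pvKey line) (pvRes u).length) := by
        simp only [pvStepB, hloc, hg]
      rw [hstep, ← pvRes_append_new u line hnotin]
      have hm' : ∀ k, (m.insert (pvKey line) (pvRes u).length).get? k
          = pvLocIdx (PySem.Set.ofList ((u ++ [line]).map pvKey)) k := by
        intro k
        have hfk : PySem.Set.ofList ((u ++ [line]).map pvKey)
            = PySem.Set.ofList (u.map pvKey) ++ [pvKey line] := by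
          rw [List.map_append, List.map_singleton, PySem.Set.ofList_append_singleton,
              PySem.Set.add_of_not_mem]
          simpa [PySem.Set.mem_ofList] using hnotin
        rw [hfk, pvLocIdx_append, PySem.Dict.get?_insert]
        by_cases hk : k = pvKey line
        · have h0 : pvLocIdx (PySem.Set.ofList (u.map pvKey)) k = none := by
            rw [hk]; exact (hm _).symm.trans hg
          rw [h0, if_pos hk, if_pos hk.symm, pvRes_length]
        · rw [if_neg hk, hm k]
          cases pvLocIdx (PySem.Set.ofList (u.map pvKey)) k
          · rw [if_neg (fun h => hk h.symm)]
          · rfl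
      have := ih (u ++ [line]) _ hm'
      simpa using this
    | some i =>
      have hidx : pvLocIdx (PySem.Set.ofList (u.map pvKey)) (pvKey line) = some i :=
        (hm (pvKey line)).symm.trans hg
      obtain ⟨hi, hki⟩ := pvLocIdx_some _ _ _ hidx
      have hilen : i < (pvRes u).length := by rw [pvRes_length]; exact hi
      have hcur : PySem.List.pyGetD (pvRes u) (i : Int) [] = pvEmit (pvKey line) (pvGrp u (pvKey line)) := by
        rw [PySem.List.pyGetD_natCast, List.getD_eq_getElem _ _ hilen]
        show (List.map _ _)[i] = _
        rw [List.getElem_map, hki]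
      have hstep : pvStepB (pvRes u, m) line
          = ((pvRes u).set i
              [PySem.List.pyGetD (pvEmit (pvKey line) (pvGrp u (pvKey line))) 0 "", pvKey line,
               PySem.List.pyGetD (pvEmit (pvKey line) (pvGrp u (pvKey line))) 2 "" ++ "<hr>"
                 ++ PySem.List.pyGetD line 2 "",
               PySem.List.pyGetD (pvEmit (pvKey line) (pvGrp u (pvKey line))) 3 "" ++ ":"
                 ++ PySem.List.pyGetD line 3 ""], m) := by
        simp only [pvStepB, hloc, hg, hcur, PySem.List.pySetD_natCast]
      rw [hstep, ← pvRes_set_merge u line i hidx]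
      have hfk : PySem.Set.ofList ((u ++ [line]).map pvKey)
          = PySem.Set.ofList (u.map pvKey) := by
        rw [List.map_append, List.map_singleton, PySem.Set.ofList_append_singleton,
            PySem.Set.add_of_mem (hki ▸ List.getElem_mem hi)]
      have hm' : ∀ k, m.get? k = pvLocIdx (PySem.Set.ofList ((u ++ [line]).map pvKey)) k := by
        intro k; rw [hfk]; exact hm k
      have := ih (u ++ [line]) m hm'
      simpa using this

theorem pv_B_eq (o : List (List String)) : combine_popups_alt o = pvRes o := by
  unfold combine_popups_alt
  have hm0 : ∀ k, (PySem.Dict.empty : PySem.Dict String Nat).get? k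
      = pvLocIdx (PySem.Set.ofList (([] : List (List String)).map pvKey)) k := by
    intro k
    simp [pvLocIdx, PySem.Dict.get?_empty]
  have h0 : (([], PySem.Dict.empty) : List (List String) × PySem.Dict String Nat)
      = (pvRes [], PySem.Dict.empty) := rfl
  rw [h0, pv_B_inv o [] PySem.Dict.empty hm0, List.nil_append]

-- ===== VERDICT (by name: the statement is the Claim_ definition above) =====
theorem combine_popups_spec : Claim_equal_combine_popups := by
  intro o _ _
  unfold Spec_combine_popups
  rw [pv_A_eq, pv_B_eq]
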